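-- pv_equiv track=rewrite | github.com/pratikbagdi/Network | Divide/Practical 3/code3.py | matrix_multiply_modulo
-- ===== SOURCE A (Python) =====
-- def matrix_multiply_modulo(matrix, vector, modulus):
--     n = len(matrix)
--     result = []
--     for i in range(n):
--         s = 0
--         for j in range(n):
--             s += matrix[i][j] * vector[j]
--         result.append(s % modulus)
--     return result
-- ===== SOURCE B (Python) =====
-- def matrix_multiply_modulo(matrix, vector, modulus):
--     # column-wise: result is a running linear combination of the matrix's columns
--     n = len(matrix)
--     result = [0] * n
--     for j in range(n):
--         vj = vector[j]
--         result = [r + row[j] * vj for r, row in zip(result, matrix)]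
--     return [r % modulus for r in result]
-- ===== Notes on version B (the rewrite author's own statement) =====
-- stated objective: alternative
-- what changed: Computes the result as a running linear combination of the matrix's columns (outer loop over columns, updating a whole partial-sum vector via zip) instead of per-row dot products, applying the modulus once at the end.
import Mathlib
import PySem

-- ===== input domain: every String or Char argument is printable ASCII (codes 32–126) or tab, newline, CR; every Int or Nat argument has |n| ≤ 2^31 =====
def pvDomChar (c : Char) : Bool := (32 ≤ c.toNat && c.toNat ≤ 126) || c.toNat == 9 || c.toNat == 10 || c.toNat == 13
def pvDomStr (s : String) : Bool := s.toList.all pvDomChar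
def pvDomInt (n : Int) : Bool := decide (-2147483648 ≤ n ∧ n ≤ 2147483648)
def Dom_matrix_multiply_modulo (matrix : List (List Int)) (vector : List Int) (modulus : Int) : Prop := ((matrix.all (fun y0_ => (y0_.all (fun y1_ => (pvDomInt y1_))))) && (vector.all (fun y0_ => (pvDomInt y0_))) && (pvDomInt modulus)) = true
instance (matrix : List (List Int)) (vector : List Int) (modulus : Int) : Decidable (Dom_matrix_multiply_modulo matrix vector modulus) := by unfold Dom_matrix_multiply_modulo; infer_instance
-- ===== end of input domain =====

-- B restructures A: a running linear combination of the matrix's columns (outer loop over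
-- columns, zip-updating a whole partial-sum vector) instead of per-row dot products ('alternative').

-- ===== PORT A =====
-- pyGetD is exact here: Pre_ guarantees every index read is in range (Python raises otherwise).
def matrix_multiply_modulo (matrix : List (List Int)) (vector : List Int) (modulus : Int) : List Int :=
  let n := PySem.List.len matrix
  List.foldl (fun result i =>
      let s := List.foldl (fun s j =>
          s + PySem.List.pyGetD (PySem.List.pyGetD matrix i []) j 0 * PySem.List.pyGetD vector j 0)
        0 (PySem.List.pyRange 0 n)
      result ++ [PySem.Int.mod s modulus]) [] (PySem.List.pyRange 0 n)

-- ===== PORT B =====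
def matrix_multiply_modulo_alt (matrix : List (List Int)) (vector : List Int) (modulus : Int) : List Int :=
  let n := PySem.List.len matrix
  let result := List.foldl (fun result j =>
      let vj := PySem.List.pyGetD vector j 0
      (result.zip matrix).map (fun p => p.1 + PySem.List.pyGetD p.2 j 0 * vj))
    (List.replicate matrix.length 0) (PySem.List.pyRange 0 n)
  result.map (fun r => PySem.Int.mod r modulus)

-- ===== PRECONDITION & SPEC =====
-- Pre_ = exactly the inputs on which Python A returns: every index read in range and, when any
-- row is processed, a nonzero modulus (IndexError / ZeroDivisionError otherwise).
def Pre_matrix_multiply_modulo (matrix : List (List Int)) (vector : List Int) (modulus : Int) : Prop :=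
  matrix = [] ∨ (modulus ≠ 0 ∧ matrix.length ≤ vector.length ∧ ∀ row ∈ matrix, matrix.length ≤ row.length)
instance (matrix : List (List Int)) (vector : List Int) (modulus : Int) : Decidable (Pre_matrix_multiply_modulo matrix vector modulus) := by unfold Pre_matrix_multiply_modulo; infer_instance

def pvWitness_matrix_multiply_modulo : List (List Int) × List Int × Int := ([[1, 2], [3, 4]], ([5, 6], 7))

def Spec_matrix_multiply_modulo (matrix : List (List Int)) (vector : List Int) (modulus : Int) (out : List Int) : Prop := out = matrix_multiply_modulo_alt matrix vector modulus
instance (matrix : List (List Int)) (vector : List Int) (modulus : Int) (out : List Int) : Decidable (Spec_matrix_multiply_modulo matrix vector modulus out) := by unfold Spec_matrix_multiply_modulo; infer_instance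

-- ===== CLAIM (what is proved, stated in full; the proofs are below) =====
def Claim_equal_matrix_multiply_modulo : Prop := ∀ (matrix : List (List Int)) (vector : List Int) (modulus : Int), Dom_matrix_multiply_modulo matrix vector modulus → Pre_matrix_multiply_modulo matrix vector modulus → Spec_matrix_multiply_modulo matrix vector modulus (matrix_multiply_modulo matrix vector modulus)

-- ===== LEMMAS AND PROOFS =====

-- zip-then-map over pairs is zipWith (B's per-column comprehension, in zipWith form)
theorem pv_zip_map (g : Int → List Int → Int) :
    ∀ (r : List Int) (mx : List (List Int)),
      (r.zip mx).map (fun p => g p.1 p.2) = List.zipWith g r mx := by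
  intro r
  induction r with
  | nil => intro mx; simp
  | cons a t ih => intro mx; cases mx <;> simp [ih]

theorem pv_zipWith_zipWith (g h : Int → List Int → Int) :
    ∀ (r : List Int) (mx : List (List Int)),
      List.zipWith g (List.zipWith h r mx) mx = List.zipWith (fun a b => g (h a b) b) r mx := by
  intro r
  induction r with
  | nil => intro mx; simp
  | cons a t ih => intro mx; cases mx <;> simp [ih]

theorem pv_zipWith_fst :
    ∀ (r : List Int) (mx : List (List Int)), r.length = mx.length →
      List.zipWith (fun a (_ : List Int) => a) r mx = r := by
  intro r
  induction r with
  | nil => intro mx _; simp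
  | cons a t ih => intro mx h; cases mx with
    | nil => simp at h
    | cons b u => simp at h; simp [ih u h]

theorem pv_zipWith_replicate (g : Int → List Int → Int) (mx : List (List Int)) :
    List.zipWith g (List.replicate mx.length 0) mx = mx.map (g 0) := by
  induction mx with
  | nil => simp
  | cons b u ih => simp [List.replicate, ih]

-- B's column loop, as a zipWith fold: accumulating columns j ∈ js adds each row's partial sum
theorem pv_col_loop (mx : List (List Int)) (f : List Int → Int → Int) :
    ∀ (js : List Int) (r : List Int), r.length = mx.length →
      List.foldl (fun r j => List.zipWith (fun a row => a + f row j) r mx) r js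
        = List.zipWith (fun a row => a + (js.map (fun j => f row j)).sum) r mx := by
  intro js
  induction js with
  | nil =>
    intro r hr
    simpa using (pv_zipWith_fst r mx hr).symm
  | cons j0 js ih =>
    intro r hr
    have hlen : (List.zipWith (fun a row => a + f row j0) r mx).length = mx.length := by
      simp [hr]
    rw [List.foldl_cons, ih _ hlen, pv_zipWith_zipWith]
    simp [add_assoc]

theorem matrix_multiply_modulo_eq (matrix : List (List Int)) (vector : List Int) (modulus : Int) :
    matrix_multiply_modulo matrix vector modulus = matrix_multiply_modulo_alt matrix vector modulus := by
  unfold matrix_multiply_modulo matrix_multiply_modulo_alt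
  have hbody : (fun (result : List Int) (j : Int) =>
        (result.zip matrix).map (fun p => p.1 + PySem.List.pyGetD p.2 j 0 * PySem.List.pyGetD vector j 0))
      = fun result j => List.zipWith
          (fun a row => a + PySem.List.pyGetD row j 0 * PySem.List.pyGetD vector j 0) result matrix := by
    funext r j
    exact pv_zip_map (fun a row => a + PySem.List.pyGetD row j 0 * PySem.List.pyGetD vector j 0) r matrix
  simp only [hbody]
  rw [pv_col_loop matrix
        (fun row j => PySem.List.pyGetD row j 0 * PySem.List.pyGetD vector j 0)
        (PySem.List.pyRange 0 (PySem.List.len matrix)) (List.replicate matrix.length 0)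
        (by simp),
      pv_zipWith_replicate,
      PySem.List.foldl_append_singleton_eq_map]
  simp only [List.nil_append, List.map_map]
  have hrows := PySem.List.map_pyGetD_pyRange_zero matrix []
  calc List.map (fun i =>
          PySem.Int.mod
            (List.foldl (fun s j =>
                s + PySem.List.pyGetD (PySem.List.pyGetD matrix i []) j 0 * PySem.List.pyGetD vector j 0)
              0 (PySem.List.pyRange 0 (PySem.List.len matrix))) modulus)
        (PySem.List.pyRange 0 (PySem.List.len matrix))
      = List.map ((fun row =>
          PySem.Int.mod
            (List.foldl (fun s j => s + PySem.List.pyGetD row j 0 * PySem.List.pyGetD vector j 0)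
              0 (PySem.List.pyRange 0 (PySem.List.len matrix))) modulus) ∘
          (fun i => PySem.List.pyGetD matrix i []))
        (PySem.List.pyRange 0 (PySem.List.len matrix)) := by rfl
    _ = _ := by
        rw [← List.map_map, hrows]
        apply List.map_congr_left
        intro row _
        rw [PySem.List.foldl_add]
        simp

-- ===== VERDICT (by name: the statement is the Claim_ definition above) =====
theorem matrix_multiply_modulo_spec : Claim_equal_matrix_multiply_modulo := by
  intro matrix vector modulus _ _
  unfold Spec_matrix_multiply_modulo
  exact matrix_multiply_modulo_eq matrix vector modulus
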